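-- pv_equiv track=rewrite | github.com/XaiZew/QR-Code-Generator | basic.py | get_format_bits
-- ===== SOURCE A (Python) =====
-- def get_format_bits(ec='L', mask_pattern_no=0):
--     mask_pattern = "000"
--     if mask_pattern_no == 1:
--         mask_pattern = "001"
--     elif mask_pattern_no == 2:
--         mask_pattern = "010"
--     elif mask_pattern_no == 3:
--         mask_pattern = "011"
--     elif mask_pattern_no == 4:
--         mask_pattern = "100"
--     elif mask_pattern_no == 5:
--         mask_pattern = "101"
--     elif mask_pattern_no == 6:
--         mask_pattern = "110"
--     elif mask_pattern_no == 7: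
--         mask_pattern = "111"
--
--     if ec == 'L':
--         error_correction = '01'
--     if ec == 'M':
--         error_correction = '00'
--     if ec == 'Q':
--         error_correction = '11'
--     if ec == 'H':
--         error_correction = '10'
--
--     format_data = error_correction + mask_pattern
--     format_data_value = int(format_data, 2)
--     data = format_data_value << 10
--     generator = 0b10100110111
--
--     for i in range(14, 9, -1):
--         if (data >> i) & 1:
--             data ^= generator << (i - 10)
--
--     # Combine original 5 bits and 10-bit error correction
--     full_format = (format_data_value << 10) | data
--
--     # Apply mask (0x5412)
--     masked = full_format ^ 0b101010000010010
--
--     return format(masked, '015b')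
-- ===== SOURCE B (Python) =====
-- _EC = {'L': 1, 'M': 0, 'Q': 3, 'H': 2}
--
-- _TABLE = ['101010000010010', '101000100100101', '101111001111100', '101101101001011',
--           '100010111111001', '100000011001110', '100111110010111', '100101010100000',
--           '111011111000100', '111001011110011', '111110110101010', '111100010011101',
--           '110011000101111', '110001100011000', '110110001000001', '110100101110110',
--           '001011010001001', '001001110111110', '001110011100111', '001100111010000',
--           '000011101100010', '000001001010101', '000110100001100', '000100000111011',
--           '011010101011111', '011000001101000', '011111100110001', '011101000000110',
--           '010010010110100', '010000110000011', '010111011011010', '010101111101101']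
--
-- def get_format_bits(ec='L', mask_pattern_no=0):
--     mask = mask_pattern_no if 1 <= mask_pattern_no <= 7 else 0
--     return _TABLE[_EC[ec] * 8 + mask]
-- ===== Notes on version B (the rewrite author's own statement) =====
-- stated objective: idiomatic
-- what changed: Replaces the binary-string concatenation, BCH remainder loop and XOR mask by a direct lookup in the standard precomputed 32-entry QR format-information table indexed by EC bits and mask number.
-- outside the precondition, e.g. on get_format_bits('X', 0): A raises NameError, B raises KeyError
import Mathlib
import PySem

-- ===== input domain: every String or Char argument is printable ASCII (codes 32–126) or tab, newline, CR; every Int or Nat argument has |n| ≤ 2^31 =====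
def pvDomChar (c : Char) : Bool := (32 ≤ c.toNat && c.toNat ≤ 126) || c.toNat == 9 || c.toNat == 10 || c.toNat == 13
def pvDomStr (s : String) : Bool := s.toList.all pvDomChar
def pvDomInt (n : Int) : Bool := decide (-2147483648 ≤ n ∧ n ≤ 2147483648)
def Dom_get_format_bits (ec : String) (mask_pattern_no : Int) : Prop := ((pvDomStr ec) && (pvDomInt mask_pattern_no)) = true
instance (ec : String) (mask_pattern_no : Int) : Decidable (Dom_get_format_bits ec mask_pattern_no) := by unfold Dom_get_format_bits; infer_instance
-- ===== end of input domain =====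

-- B replaces the BCH remainder loop and XOR mask with a lookup in the standard
-- precomputed 32-entry QR format-information table (idiomatic; same O(1) cost).

-- ===== PORT A =====
-- int(s, 2) for a string of '0'/'1' characters (exact on such strings, the only ones A builds)
def pvBin2Nat (s : String) : Nat :=
  s.toList.foldl (fun acc c => acc * 2 + (if c = '1' then 1 else 0)) 0

-- format(n, '015b') for n < 2^15 (the only values A reaches: masked < 2^15)
def pvFmt15 (n : Nat) : String :=
  String.ofList (((List.range 15).reverse).map (fun i => if n.testBit i then '1' else '0'))

def get_format_bits (ec : String) (mask_pattern_no : Int) : String :=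
  let mask_pattern : String :=
    if mask_pattern_no = 1 then "001"
    else if mask_pattern_no = 2 then "010"
    else if mask_pattern_no = 3 then "011"
    else if mask_pattern_no = 4 then "100"
    else if mask_pattern_no = 5 then "101"
    else if mask_pattern_no = 6 then "110"
    else if mask_pattern_no = 7 then "111"
    else "000"
  -- A's four separate ifs on mutually exclusive string literals; none matching = NameError (excluded by Pre_)
  let error_correction : Option String :=
    if ec = "L" then some "01"
    else if ec = "M" then some "00"
    else if ec = "Q" then some "11"
    else if ec = "H" then some "10"
    else none
  match error_correction with
  | none => ""  -- NameError in Python; unreachable under Pre_get_format_bits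
  | some e =>
    let format_data := e ++ mask_pattern
    let format_data_value := pvBin2Nat format_data
    let data := format_data_value <<< 10
    let generator : Nat := 0b10100110111
    -- for i in range(14, 9, -1)
    let data := [14, 13, 12, 11, 10].foldl
      (fun data i => if (data >>> i) % 2 = 1 then data ^^^ (generator <<< (i - 10)) else data) data
    let full_format := (format_data_value <<< 10) ||| data
    let masked := full_format ^^^ 0b101010000010010
    pvFmt15 masked

-- ===== PORT B =====
def fmtTable : List String :=
  ["101010000010010", "101000100100101", "101111001111100", "101101101001011",
   "100010111111001", "100000011001110", "100111110010111", "100101010100000",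
   "111011111000100", "111001011110011", "111110110101010", "111100010011101",
   "110011000101111", "110001100011000", "110110001000001", "110100101110110",
   "001011010001001", "001001110111110", "001110011100111", "001100111010000",
   "000011101100010", "000001001010101", "000110100001100", "000100000111011",
   "011010101011111", "011000001101000", "011111100110001", "011101000000110",
   "010010010110100", "010000110000011", "010111011011010", "010101111101101"]

def ecDict : PySem.Dict String Nat := PySem.Dict.ofList [("L", 1), ("M", 0), ("Q", 3), ("H", 2)]

def get_format_bits_alt (ec : String) (mask_pattern_no : Int) : String :=
  let mask : Nat := if 1 ≤ mask_pattern_no ∧ mask_pattern_no ≤ 7 then mask_pattern_no.toNat else 0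
  match PySem.Dict.get? ecDict ec with
  | none => ""  -- KeyError in Python; unreachable under Pre_get_format_bits
  | some v => fmtTable.getD (v * 8 + mask) ""

-- ===== PRECONDITION & SPEC =====
-- Pre_ excludes ec outside {L,M,Q,H}, where A raises NameError (and B raises KeyError).
def Pre_get_format_bits (ec : String) (mask_pattern_no : Int) : Prop :=
  ec = "L" ∨ ec = "M" ∨ ec = "Q" ∨ ec = "H"
instance (ec : String) (mask_pattern_no : Int) : Decidable (Pre_get_format_bits ec mask_pattern_no) := by unfold Pre_get_format_bits; infer_instance
def pvWitness_get_format_bits : String × Int := ("L", 0)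

def Spec_get_format_bits (ec : String) (mask_pattern_no : Int) (out : String) : Prop := out = get_format_bits_alt ec mask_pattern_no
instance (ec : String) (mask_pattern_no : Int) (out : String) : Decidable (Spec_get_format_bits ec mask_pattern_no out) := by unfold Spec_get_format_bits; infer_instance

-- ===== CLAIM (what is proved, stated in full; the proofs are below) =====
def Claim_equal_get_format_bits : Prop := ∀ (ec : String) (mask_pattern_no : Int), Dom_get_format_bits ec mask_pattern_no → Pre_get_format_bits ec mask_pattern_no → Spec_get_format_bits ec mask_pattern_no (get_format_bits ec mask_pattern_no)

-- ===== LEMMAS AND PROOFS =====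
-- If the mask number is outside 1..7 both programs behave as for mask 0.
theorem a_default (ec : String) (m : Int) (h1 : m ≠ 1) (h2 : m ≠ 2) (h3 : m ≠ 3)
    (h4 : m ≠ 4) (h5 : m ≠ 5) (h6 : m ≠ 6) (h7 : m ≠ 7) :
    get_format_bits ec m = get_format_bits ec 0 := by
  simp [get_format_bits, h1, h2, h3, h4, h5, h6, h7]

theorem b_default (ec : String) (m : Int) (h1 : m ≠ 1) (h2 : m ≠ 2) (h3 : m ≠ 3)
    (h4 : m ≠ 4) (h5 : m ≠ 5) (h6 : m ≠ 6) (h7 : m ≠ 7) :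
    get_format_bits_alt ec m = get_format_bits_alt ec 0 := by
  have : ¬ (1 ≤ m ∧ m ≤ 7) := by rintro ⟨hl, hr⟩; omega
  simp [get_format_bits_alt, this]

-- ===== VERDICT (by name: the statement is the Claim_ definition above) =====
theorem get_format_bits_spec : Claim_equal_get_format_bits := by
  unfold Claim_equal_get_format_bits
  intro ec m _ hpre
  unfold Spec_get_format_bits
  by_cases h1 : m = 1
  · subst h1; rcases hpre with h | h | h | h <;> subst h <;> rfl
  · by_cases h2 : m = 2
    · subst h2; rcases hpre with h | h | h | h <;> subst h <;> rfl
    · by_cases h3 : m = 3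
      · subst h3; rcases hpre with h | h | h | h <;> subst h <;> rfl
      · by_cases h4 : m = 4
        · subst h4; rcases hpre with h | h | h | h <;> subst h <;> rfl
        · by_cases h5 : m = 5
          · subst h5; rcases hpre with h | h | h | h <;> subst h <;> rfl
          · by_cases h6 : m = 6
            · subst h6; rcases hpre with h | h | h | h <;> subst h <;> rfl
            · by_cases h7 : m = 7
              · subst h7; rcases hpre with h | h | h | h <;> subst h <;> rfl
              · rw [a_default ec m h1 h2 h3 h4 h5 h6 h7, b_default ec m h1 h2 h3 h4 h5 h6 h7]
                rcases hpre with h | h | h | h <;> subst h <;> rfl
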